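-- pv_equiv track=rewrite | github.com/MinKyeom/KMK-DREAM | Programmers/Lv1/모의고사.py | solution
-- ===== SOURCE A (Python) =====
-- def solution(answers):
--     num_1 = "12345"
--     num_2 = "21232425"
--     num_3 = "3311224455"
--     result_1 = 0
--     result_2 = 0
--     result_3 = 0
--     k = len(answers)
--     if k < 5:
--         num_1 = num_1[0:k]
--     if k < 8:
--         num_2 = num_2[0:k]
--     if k < 10:
--         num_3 = num_3[0:k]
--
--     for x in range(k):
--         if k > 5 and x % 5 == 0:
--             p = num_1[0:1]
--             num_1 = num_1 + p
--         elif k > 5: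
--             f = (x % 5)
--             p = num_1[f:f + 1]
--             num_1 = num_1 + p
--
--         if k > 8 and x % 8 == 0:
--             q = num_2[0:1]
--             num_2 = num_2 + q
--         elif k > 8:
--             e = (x % 8)
--             q = num_2[e:e + 1]
--             num_2 = num_2 + q
--         if k > 10 and x % 10 == 0:
--             r = num_3[0:1]
--             num_3 = num_3 + r
--         elif k > 10:
--             g = (x % 10)
--             q = num_3[g:g + 1]
--             num_3 = num_3 + q
--
--     a = list(num_1)
--     b = list(num_2)
--     c = list(num_3)
--
--     for x in range(len(answers)):
--         if answers[x] == int(a[x]):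
--             result_1 += 1
--         if answers[x] == int(b[x]):
--             result_2 += 1
--         if answers[x] == int(c[x]):
--             result_3 += 1
--     k = [[result_1, 1], [result_2, 2], [result_3, 3]]
--     k.sort(reverse=True)
--     result = []
--     check = []
--
--     for v, w in k:
--         if len(result) == 0:
--             result.append(w)
--             check.append(v)
--         if max(check) == v:
--             result.append(w)
--         else:
--             continue
--     result = list(set(result))
--     result.sort()
--
--     return result
-- ===== SOURCE B (Python) =====
-- def solution(answers):
--     p1 = [1, 2, 3, 4, 5]
--     p2 = [2, 1, 2, 3, 2, 4, 2, 5]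
--     p3 = [3, 3, 1, 1, 2, 2, 4, 4, 5, 5]
--     s1 = s2 = s3 = 0
--     for i in range(len(answers)):
--         a = answers[i]
--         if a == p1[i % 5]:
--             s1 += 1
--         if a == p2[i % 8]:
--             s2 += 1
--         if a == p3[i % 10]:
--             s3 += 1
--     best = max(s1, s2, s3)
--     return [w for w, s in ((1, s1), (2, s2), (3, s3)) if s == best]
-- ===== Notes on version B (the rewrite author's own statement) =====
-- stated objective: simpler
-- what changed: B drops A's pattern-materialization pass (growing three digit strings character by character and converting chars back to ints) and scores answers in one pass by modular indexing into three fixed Int pattern lists, and replaces A's sort-reverse/append/set/dedup/sort tie-selection with a plain max-and-filter.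
import Mathlib
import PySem

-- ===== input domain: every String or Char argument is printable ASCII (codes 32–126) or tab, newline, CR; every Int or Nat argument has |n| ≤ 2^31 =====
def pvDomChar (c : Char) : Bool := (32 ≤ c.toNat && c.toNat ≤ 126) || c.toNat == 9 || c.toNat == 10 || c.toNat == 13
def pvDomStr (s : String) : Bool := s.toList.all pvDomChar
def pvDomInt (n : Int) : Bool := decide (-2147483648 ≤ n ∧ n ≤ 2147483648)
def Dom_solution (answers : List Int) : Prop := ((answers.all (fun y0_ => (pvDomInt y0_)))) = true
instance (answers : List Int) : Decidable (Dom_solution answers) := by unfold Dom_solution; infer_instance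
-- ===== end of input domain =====

-- B replaces A's two-phase string machinery (materialize cyclic digit strings, then score,
-- then sort/set/dedup select) by inline modular indexing into fixed Int patterns and a
-- max-filter selection; objective: simpler.

-- ===== PORT A =====
-- one iteration of A's pattern-extending loop for one string (modulus/threshold T, guard k)
def pvGrowStep (k T : Int) (n : List Char) (x : Int) : List Char :=
  if k > T ∧ PySem.Int.mod x T = 0 then
    n ++ PySem.List.slice n (some 0) (some 1)
  else if k > T then
    let f := PySem.Int.mod x T
    n ++ PySem.List.slice n (some f) (some (f + 1))
  else n

-- int(a[x]) of A's counting loop: a[x] is always a digit char there, so getD 0 never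
-- supplies the default on a reached input
def pvDigit (c : Char) : Int := (PySem.Int.ofChars? [c]).getD 0

-- A's tail: k = [[r1,1],[r2,2],[r3,3]]; k.sort(reverse=True); the result/check loop;
-- list(set(result)); result.sort()
def pvSelA (r1 r2 r3 : Int) : List Int :=
  let kk := PySem.List.sorted2 ([(r1, 1), (r2, 2), (r3, 3)] : List (Int × Int))
    (fun p => p.1) (fun p => p.2) true
  let rc := kk.foldl
    (fun (rc : List Int × List Int) vw =>
      let rc := if rc.1.length = 0 then (rc.1 ++ [vw.2], rc.2 ++ [vw.1]) else rc
      -- max(check): check is nonempty whenever this line runs, so getD 0 never supplies the default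
      let result := if (PySem.List.max? rc.2 (fun y => y)).getD 0 = vw.1 then rc.1 ++ [vw.2] else rc.1
      (result, rc.2))
    ([], [])
  PySem.List.sorted (PySem.Set.ofList rc.1) (fun y => y) false

def solution (answers : List Int) : List Int :=
  let k : Int := (answers.length : Int)
  let num1 : List Char :=
    if k < 5 then PySem.List.slice ['1','2','3','4','5'] (some 0) (some k)
    else ['1','2','3','4','5']
  let num2 : List Char :=
    if k < 8 then PySem.List.slice ['2','1','2','3','2','4','2','5'] (some 0) (some k)
    else ['2','1','2','3','2','4','2','5']
  let num3 : List Char :=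
    if k < 10 then PySem.List.slice ['3','3','1','1','2','2','4','4','5','5'] (some 0) (some k)
    else ['3','3','1','1','2','2','4','4','5','5']
  let st := (PySem.List.pyRange 0 k 1).foldl
    (fun (st : List Char × List Char × List Char) x =>
      (pvGrowStep k 5 st.1 x, pvGrowStep k 8 st.2.1 x, pvGrowStep k 10 st.2.2 x))
    (num1, num2, num3)
  let a := st.1
  let b := st.2.1
  let c := st.2.2
  let rs := (PySem.List.pyRange 0 (answers.length : Int) 1).foldl
    (fun (rs : Int × Int × Int) x =>
      let ax := PySem.List.pyGetD answers x 0
      let r1 := if ax = pvDigit (PySem.List.pyGetD a x ' ') then rs.1 + 1 else rs.1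
      let r2 := if ax = pvDigit (PySem.List.pyGetD b x ' ') then rs.2.1 + 1 else rs.2.1
      let r3 := if ax = pvDigit (PySem.List.pyGetD c x ' ') then rs.2.2 + 1 else rs.2.2
      (r1, r2, r3))
    (0, 0, 0)
  pvSelA rs.1 rs.2.1 rs.2.2

-- ===== PORT B =====
-- B's tail: best = max of the three scores; [i+1 for the tied scores], already ascending
def pvSelB (r1 r2 r3 : Int) : List Int :=
  let best := max r1 (max r2 r3)
  (([(1, r1), (2, r2), (3, r3)] : List (Int × Int)).filter
    (fun ws => ws.2 = best)).map (fun ws => ws.1)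

def solution_alt (answers : List Int) : List Int :=
  let p1 : List Int := [1, 2, 3, 4, 5]
  let p2 : List Int := [2, 1, 2, 3, 2, 4, 2, 5]
  let p3 : List Int := [3, 3, 1, 1, 2, 2, 4, 4, 5, 5]
  let s := (PySem.List.pyRange 0 (answers.length : Int) 1).foldl
    (fun (s : Int × Int × Int) i =>
      let a := PySem.List.pyGetD answers i 0
      let s1 := if a = PySem.List.pyGetD p1 (PySem.Int.mod i 5) 0 then s.1 + 1 else s.1
      let s2 := if a = PySem.List.pyGetD p2 (PySem.Int.mod i 8) 0 then s.2.1 + 1 else s.2.1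
      let s3 := if a = PySem.List.pyGetD p3 (PySem.Int.mod i 10) 0 then s.2.2 + 1 else s.2.2
      (s1, s2, s3))
    (0, 0, 0)
  pvSelB s.1 s.2.1 s.2.2

-- ===== PRECONDITION & SPEC =====
def Spec_solution (answers : List Int) (out : List Int) : Prop := out = solution_alt answers
instance (answers : List Int) (out : List Int) : Decidable (Spec_solution answers out) := by unfold Spec_solution; infer_instance

-- ===== CLAIM (what is proved, stated in full; the proofs are below) =====
def Claim_equal_solution : Prop := ∀ (answers : List Int), Dom_solution answers → Spec_solution answers (solution answers)

-- ===== LEMMAS AND PROOFS =====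

-- the selection tails agree: both return the ascending list of 1-indexed maximal scores
set_option maxHeartbeats 4000000 in
lemma pv_sel_eq (r1 r2 r3 : Int) : pvSelA r1 r2 r3 = pvSelB r1 r2 r3 := by
  rcases lt_trichotomy r1 r2 with h12|h12|h12 <;>
  rcases lt_trichotomy r1 r3 with h13|h13|h13 <;>
  rcases lt_trichotomy r2 r3 with h23|h23|h23 <;>
  subst_vars <;>
  first
  | omega
  | simp [pvSelA, pvSelB, PySem.List.sorted2, PySem.List.sorted, PySem.List.insertBy,
      PySem.List.max?, PySem.Set.ofList, ne_of_gt, ne_of_lt, le_of_lt, lt_asymm, *]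

lemma pv_take_one_drop {α : Type} (g : List α) (m : Nat) (hm : m < g.length) :
    (g.drop m).take 1 = [g[m]] := by
  rw [List.take_one]
  simp [List.head?_drop, List.getElem?_eq_getElem hm]

lemma pvGrowStep_id {k T : Int} (hk : ¬ k > T) (n : List Char) (x : Int) :
    pvGrowStep k T n x = n := by
  unfold pvGrowStep
  simp [hk]

lemma pv_foldl_fixed {α β : Type} (l : List β) (F : α → β → α) (h : ∀ m x, F m x = m)
    (n : α) : l.foldl F n = n := by
  induction l generalizing n with
  | nil => rfl
  | cons y ys ih => simp [h, ih]

lemma pvGrowStep_eq (k T : Int) (hkT : k > T) (g : List Char) (x : Int) (m : Nat)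
    (hmod : PySem.Int.mod x T = (m : Int)) (hm : m < g.length) :
    pvGrowStep k T g x = g ++ [g[m]] := by
  unfold pvGrowStep
  by_cases h0 : PySem.Int.mod x T = 0
  · have hm0 : m = 0 := by
      have : (m : Int) = 0 := by rw [← hmod, h0]
      exact_mod_cast this
    subst hm0
    rw [if_pos ⟨hkT, h0⟩, PySem.List.slice_toNat _ (by norm_num) (by norm_num)]
    have h01 := pv_take_one_drop g 0 hm
    simp only [List.drop_zero] at h01
    norm_num [h01]
  · rw [if_neg (by tauto), if_pos hkT]
    simp only [hmod]
    rw [PySem.List.slice_toNat _ (by positivity) (by positivity)]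
    have h1 : ((m : Int) + 1).toNat = m + 1 := by omega
    have h2 : ((m : Int)).toNat = m := by omega
    rw [h1, h2, Nat.add_sub_cancel_left, pv_take_one_drop g m hm]

-- invariant of A's pattern-extending loop: element i of the grown list is pattern[i % T]
lemma pvGrow_spec (pat : List Char) (TN : Nat) (hT : pat.length = TN) (hpos : 0 < TN)
    (k : Int) (hk : (TN : Int) < k) (j : Nat) :
    (((PySem.List.pyRange 0 (j : Int) 1).foldl (pvGrowStep k (TN : Int)) pat).length = TN + j) ∧
    (∀ i : Nat, i < TN + j →
      ((PySem.List.pyRange 0 (j : Int) 1).foldl (pvGrowStep k (TN : Int)) pat)[i]? = pat[i % TN]?) := by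
  induction j with
  | zero =>
    rw [show ((0 : Nat) : Int) = 0 by norm_num, PySem.List.pyRange_one_eq_nil (le_refl 0)]
    refine ⟨by simpa using hT, ?_⟩
    intro i hi
    rw [Nat.mod_eq_of_lt (by omega)]
    rfl
  | succ j ih =>
    obtain ⟨hlen, hidx⟩ := ih
    have hcast : ((j + 1 : Nat) : Int) = (j : Int) + 1 := by push_cast; ring
    rw [hcast, PySem.List.pyRange_one_succ_right (by positivity), List.foldl_append]
    set g := (PySem.List.pyRange 0 (j : Int) 1).foldl (pvGrowStep k (TN : Int)) pat with hg
    have hmlt : j % TN < TN := Nat.mod_lt _ hpos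
    have hmlen : j % TN < g.length := by omega
    have hmod : PySem.Int.mod (j : Int) (TN : Int) = ((j % TN : Nat) : Int) :=
      PySem.Int.mod_natCast j TN
    rw [show List.foldl (pvGrowStep k (TN : Int)) g [(j : Int)] = pvGrowStep k (TN : Int) g (j : Int) from rfl,
      pvGrowStep_eq k (TN : Int) hk g (j : Int) (j % TN) hmod hmlen]
    constructor
    · simp [hlen]; omega
    · intro i hi
      by_cases hlt : i < TN + j
      · rw [List.getElem?_append_left (by omega : i < g.length)]
        exact hidx i hlt
      · have hieq : i = TN + j := by omega
        subst hieq
        rw [List.getElem?_append_right (by omega : g.length ≤ TN + j)]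
        have hz : TN + j - g.length = 0 := by omega
        rw [hz]
        have h1 : (TN + j) % TN = j % TN := Nat.add_mod_left TN j
        rw [h1]
        have h2 := hidx (j % TN) (by omega)
        rw [Nat.mod_eq_of_lt hmlt] at h2
        rw [← h2, List.getElem?_eq_getElem hmlen]
        rfl

-- A's finished pattern list, indexed inside range, is the cyclic pattern
lemma pvAList_get (pat : List Char) (TN : Nat) (hT : pat.length = TN) (hpos : 0 < TN)
    (kN : Nat) (x : Nat) (hx : x < kN) :
    ((PySem.List.pyRange 0 (kN : Int) 1).foldl (pvGrowStep (kN : Int) (TN : Int))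
      (if (kN : Int) < (TN : Int) then PySem.List.slice pat (some 0) (some (kN : Int)) else pat))[x]?
      = pat[x % TN]? := by
  by_cases hbig : (TN : Int) < (kN : Int)
  · rw [if_neg (by omega)]
    have hlt' : TN < kN := by exact_mod_cast hbig
    exact (pvGrow_spec pat TN hT hpos _ hbig kN).2 x (by omega)
  · have hle : kN ≤ TN := by exact_mod_cast not_lt.mp hbig
    rw [pv_foldl_fixed _ _ (fun m x' => pvGrowStep_id (by omega) m x') _]
    rw [Nat.mod_eq_of_lt (by omega : x < TN)]
    by_cases hlt : (kN : Int) < (TN : Int)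
    · rw [if_pos hlt, PySem.List.slice_toNat _ (le_refl 0) (by positivity)]
      have h2 : ((kN : Int)).toNat = kN := by omega
      rw [h2]
      simp [hx]
    · rw [if_neg hlt]

-- the two scoring conditions coincide index by index
lemma pvCount_eq (answers : List Int) (pat : List Char) (p : List Int) (T : Int) (TN : Nat)
    (hTi : T = (TN : Int)) (hT : pat.length = TN) (hpos : 0 < TN) (hmap : pat.map pvDigit = p)
    (x : Int) (hx : x ∈ PySem.List.pyRange 0 (answers.length : Int) 1) :
    pvDigit (PySem.List.pyGetD
      ((PySem.List.pyRange 0 (answers.length : Int) 1).foldl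
        (pvGrowStep (answers.length : Int) T)
        (if (answers.length : Int) < T then
          PySem.List.slice pat (some 0) (some (answers.length : Int)) else pat)) x ' ')
      = PySem.List.pyGetD p (PySem.Int.mod x T) 0 := by
  subst hTi
  rw [PySem.List.mem_pyRange_one] at hx
  obtain ⟨h0, h1⟩ := hx
  obtain ⟨xn, rfl⟩ := Int.eq_ofNat_of_zero_le h0
  have hxk : xn < answers.length := by exact_mod_cast h1
  rw [PySem.List.pyGetD_natCast, PySem.Int.mod_natCast, PySem.List.pyGetD_natCast,
    List.getD_eq_getElem?_getD, List.getD_eq_getElem?_getD,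
    pvAList_get pat TN hT hpos answers.length xn hxk, ← hmap, List.getElem?_map]
  have hm : xn % TN < pat.length := by rw [hT]; exact Nat.mod_lt _ hpos
  rw [List.getElem?_eq_getElem hm]
  rfl

-- a fold of a triple whose components evolve independently is the triple of the folds
lemma pv_foldl_prod3 {A B C D : Type} (l : List D) (f : A → D → A) (g : B → D → B)
    (h : C → D → C) (a : A) (b : B) (c : C) :
    l.foldl (fun st x => (f st.1 x, g st.2.1 x, h st.2.2 x)) (a, b, c)
      = (l.foldl f a, l.foldl g b, l.foldl h c) := by
  induction l generalizing a b c with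
  | nil => rfl
  | cons y ys ih => simpa using ih (f a y) (g b y) (h c y)

-- ===== VERDICT (by name: the statement is the Claim_ definition above) =====
theorem solution_spec : Claim_equal_solution := by
  intro answers _
  show solution answers = solution_alt answers
  unfold solution solution_alt
  simp only [pv_foldl_prod3]
  rw [PySem.List.foldl_congr_mem _ _ (fun (s : Int × Int × Int) i =>
      let a := PySem.List.pyGetD answers i 0
      let s1 := if a = PySem.List.pyGetD ([1,2,3,4,5] : List Int) (PySem.Int.mod i 5) 0 then s.1 + 1 else s.1
      let s2 := if a = PySem.List.pyGetD ([2,1,2,3,2,4,2,5] : List Int) (PySem.Int.mod i 8) 0 then s.2.1 + 1 else s.2.1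
      let s3 := if a = PySem.List.pyGetD ([3,3,1,1,2,2,4,4,5,5] : List Int) (PySem.Int.mod i 10) 0 then s.2.2 + 1 else s.2.2
      (s1, s2, s3)) _
    (by
      intro acc x hx
      have e1 := pvCount_eq answers ['1','2','3','4','5'] [1,2,3,4,5] 5 5 (by norm_num) rfl (by norm_num) (by decide) x hx
      have e2 := pvCount_eq answers ['2','1','2','3','2','4','2','5'] [2,1,2,3,2,4,2,5] 8 8 (by norm_num) rfl (by norm_num) (by decide) x hx
      have e3 := pvCount_eq answers ['3','3','1','1','2','2','4','4','5','5'] [3,3,1,1,2,2,4,4,5,5] 10 10 (by norm_num) rfl (by norm_num) (by decide) x hx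
      simp only [e1, e2, e3])]
  exact pv_sel_eq _ _ _
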